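-- pv_equiv track=rewrite | github.com/wangela/coding-fun | week6/20180225-test.py | getMaxOccurrences
-- ===== SOURCE A (Python) =====
-- def getMaxOccurrences(s, minLength, maxLength, maxUnique):
--     # Example: "abcde", 2, 4, 26 -> "ab" x 1, "bc" x 1,"cd" x 1, "de" x 1 -> 1
--     #   "ababab", 2, 3, 4 -> "ab" x 3, "aba" x 2, "bab" x 2, "ba" x 2 -> 3
--     subs = dict()
--
--     for start_index in range(len(s) - minLength + 1):
--         sub = s[start_index:start_index + minLength]
--         uniques = set()
--         for character in sub:
--             if character not in uniques:
--                 uniques.add(character)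
--         if len(uniques) > maxUnique:
--             continue
--         if sub in subs:
--             subs[sub] += 1
--         else:
--             subs[sub] = 1
--
--     occurrences = []
--     for substring in subs.keys():
--         occurrences.append(subs[substring])
--
--     if len(occurrences) > 0:
--         return max(occurrences)
--     else:
--         return 0
-- ===== SOURCE B (Python) =====
-- def getMaxOccurrences(s, minLength, maxLength, maxUnique):
--     subs = sorted(s[i:i + minLength] for i in range(len(s) - minLength + 1)
--                   if len(set(s[i:i + minLength])) <= maxUnique)
--     best = 0
--     run = 0
--     prev = None
--     for sub in subs:
--         if sub == prev:
--             run += 1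
--         else:
--             prev = sub
--             run = 1
--         if run > best:
--             best = run
--     return best
-- ===== Notes on version B (the rewrite author's own statement) =====
-- stated objective: alternative
-- what changed: Replaces A's incrementally built dict of substring counts (plus a keys pass and max()) by sorting the qualifying substrings and scanning the sorted list for the longest run of equal neighbours; no dictionary is used.
import Mathlib
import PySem

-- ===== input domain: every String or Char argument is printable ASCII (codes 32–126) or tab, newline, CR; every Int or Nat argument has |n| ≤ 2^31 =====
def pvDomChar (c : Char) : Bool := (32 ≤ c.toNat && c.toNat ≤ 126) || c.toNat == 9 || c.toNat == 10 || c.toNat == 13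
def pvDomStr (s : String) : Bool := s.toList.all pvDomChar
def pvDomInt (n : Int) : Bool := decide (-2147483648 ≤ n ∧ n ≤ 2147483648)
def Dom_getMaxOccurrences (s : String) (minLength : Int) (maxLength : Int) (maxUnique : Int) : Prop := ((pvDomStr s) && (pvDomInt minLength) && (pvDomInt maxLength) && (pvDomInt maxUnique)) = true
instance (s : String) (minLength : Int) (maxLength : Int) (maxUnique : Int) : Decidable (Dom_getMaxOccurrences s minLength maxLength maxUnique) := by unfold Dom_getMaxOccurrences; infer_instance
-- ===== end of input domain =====

-- B replaces A's dict of counts (plus a keys pass and max()) by sorting the qualifying substrings and scanning for the longest run of equal neighbours: no dictionary at all.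

-- ===== PORT A =====
def getMaxOccurrences (s : String) (minLength : Int) (maxLength : Int) (maxUnique : Int) : Int :=
  let cs := s.toList
  let subs : PySem.Dict (List Char) Int :=
    (PySem.List.pyRange 0 (PySem.List.len cs - minLength + 1) 1).foldl
      (fun d start_index =>
        let sub := PySem.List.slice cs (some start_index) (some (start_index + minLength))
        let uniques := sub.foldl
          (fun (u : PySem.Set Char) character =>
            if PySem.Set.contains u character then u else PySem.Set.add u character)
          PySem.Set.empty
        if PySem.List.len uniques > maxUnique then d
        else if d.contains sub then d.insert sub (d.getD sub 0 + 1)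
        else d.insert sub 1)
      PySem.Dict.empty
  let occurrences : List Int :=
    subs.keys.foldl (fun acc substring => acc ++ [subs.getD substring 0]) []
  if PySem.List.len occurrences > 0 then (PySem.List.max? occurrences (fun x => x)).getD 0
  else 0

-- ===== PORT B =====
def getMaxOccurrences_alt (s : String) (minLength : Int) (maxLength : Int) (maxUnique : Int) : Int :=
  let cs := s.toList
  let subs : List (List Char) :=
    PySem.List.sorted
      (((PySem.List.pyRange 0 (PySem.List.len cs - minLength + 1) 1).map
          (fun i => PySem.List.slice cs (some i) (some (i + minLength)))).filter
        (fun sub => decide (PySem.List.len (PySem.Set.ofList sub) ≤ maxUnique)))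
      (fun x => x) false
  (subs.foldl
    (fun (st : Option (List Char) × Int × Int) sub =>
      let prev := st.1
      let run := st.2.1
      let best := st.2.2
      let run2 := if some sub = prev then run + 1 else 1
      let prev2 := if some sub = prev then prev else some sub
      let best2 := if run2 > best then run2 else best
      (prev2, run2, best2))
    (none, 0, 0)).2.2

-- ===== PRECONDITION & SPEC =====
def Spec_getMaxOccurrences (s : String) (minLength : Int) (maxLength : Int) (maxUnique : Int) (out : Int) : Prop := out = getMaxOccurrences_alt s minLength maxLength maxUnique
instance (s : String) (minLength : Int) (maxLength : Int) (maxUnique : Int) (out : Int) : Decidable (Spec_getMaxOccurrences s minLength maxLength maxUnique out) := by unfold Spec_getMaxOccurrences; infer_instance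

-- ===== CLAIM (what is proved, stated in full; the proofs are below) =====
def Claim_equal_getMaxOccurrences : Prop := ∀ (s : String) (minLength : Int) (maxLength : Int) (maxUnique : Int), Dom_getMaxOccurrences s minLength maxLength maxUnique → Spec_getMaxOccurrences s minLength maxLength maxUnique (getMaxOccurrences s minLength maxLength maxUnique)

-- ===== LEMMAS AND PROOFS =====

-- B's loop body, named for the proofs (definitionally the lambda in the port of B).
def pvStep (st : Option (List Char) × Int × Int) (sub : List Char) : Option (List Char) × Int × Int :=
  let prev := st.1
  let run := st.2.1
  let best := st.2.2
  let run2 := if some sub = prev then run + 1 else 1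
  let prev2 := if some sub = prev then prev else some sub
  let best2 := if run2 > best then run2 else best
  (prev2, run2, best2)

-- what B's scan computes on a tail t, having just closed a run of r copies of v with best-so-far b
def pvRunMax (t : List (List Char)) (v : List Char) (r b : Int) : Int :=
  t.foldl (fun acc y => max acc ((t.count y : Int) + if y = v then r else 0)) b

-- A's dict after the index loop is Counter(L) for L = the filtered substring list that B sorts.
lemma dict_eq_counter (cs : List Char) (minLength maxUnique : Int) :
    ((PySem.List.pyRange 0 (PySem.List.len cs - minLength + 1) 1).foldl
      (fun (d : PySem.Dict (List Char) Int) start_index =>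
        let sub := PySem.List.slice cs (some start_index) (some (start_index + minLength))
        let uniques := sub.foldl
          (fun (u : PySem.Set Char) character =>
            if PySem.Set.contains u character then u else PySem.Set.add u character)
          PySem.Set.empty
        if PySem.List.len uniques > maxUnique then d
        else if d.contains sub then d.insert sub (d.getD sub 0 + 1)
        else d.insert sub 1)
      PySem.Dict.empty)
    = PySem.Dict.counter
        (((PySem.List.pyRange 0 (PySem.List.len cs - minLength + 1) 1).map
            (fun i => PySem.List.slice cs (some i) (some (i + minLength)))).filter
          (fun sub => decide (PySem.List.len (PySem.Set.ofList sub) ≤ maxUnique))) := by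
  have hset : ∀ sub : List Char,
      sub.foldl (fun (u : PySem.Set Char) c =>
        if PySem.Set.contains u c then u else PySem.Set.add u c) PySem.Set.empty
      = PySem.Set.ofList sub := by
    intro sub
    rw [PySem.Set.ofList_eq_foldl]
    apply PySem.List.foldl_congr_mem
    intro u c _
    by_cases h : PySem.Set.contains u c = true
    · rw [if_pos h, PySem.Set.add, if_pos h]
    · rw [if_neg h]
  trans ((PySem.List.pyRange 0 (PySem.List.len cs - minLength + 1) 1).foldl
      (fun (d : PySem.Dict (List Char) Int) i =>
        if decide (PySem.List.len (PySem.Set.ofList (PySem.List.slice cs (some i) (some (i + minLength)))) ≤ maxUnique)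
        then d.insert (PySem.List.slice cs (some i) (some (i + minLength)))
               (d.getD (PySem.List.slice cs (some i) (some (i + minLength))) 0 + 1)
        else d)
      PySem.Dict.empty)
  · apply PySem.List.foldl_congr_mem
    intro d i _
    simp only [hset, gt_iff_lt, decide_eq_true_eq]
    split_ifs with h1 h2 h3 <;> try rfl
    · omega
    · omega
    · have h0 : d.getD (PySem.List.slice cs (some i) (some (i + minLength))) 0 = 0 := by
        apply PySem.Dict.getD_of_not_contains
        simpa using h3
      rw [h0]
      norm_num
    · omega
  · rw [PySem.List.foldl_if_eq_foldl_filter]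
    rw [← List.foldl_map (f := fun i : Int => PySem.List.slice cs (some i) (some (i + minLength)))
          (g := fun (d : PySem.Dict (List Char) Int) sub => d.insert sub (d.getD sub 0 + 1))]
    rw [List.filter_map, ← PySem.Dict.foldl_insert_getD_add_one_eq_counter]
    rfl

-- pulling a second start value out of a running-max fold
lemma foldl_max_init {α : Type} (l : List α) (f : α → Int) (i a : Int) :
    l.foldl (fun acc y => max acc (f y)) (max i a)
      = max (l.foldl (fun acc y => max acc (f y)) i) a := by
  induction l generalizing i with
  | nil => rfl
  | cons x t ih =>
    simp only [List.foldl_cons]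
    rw [show max (max i a) (f x) = max (max i (f x)) a by omega, ih]

-- a running max is bounded by any common bound
lemma foldl_max_le {α : Type} (l : List α) (f : α → Int) (i c : Int)
    (hi : i ≤ c) (h : ∀ x ∈ l, f x ≤ c) :
    l.foldl (fun acc y => max acc (f y)) i ≤ c := by
  induction l generalizing i with
  | nil => exact hi
  | cons x t ih =>
    simp only [List.foldl_cons]
    exact ih (max i (f x)) (by have := h x (List.mem_cons_self); omega)
      (fun y hy => h y (List.mem_cons_of_mem x hy))

-- the run-scan invariant: on a sorted tail whose elements all dominate the current run value v,
-- the scan computes the running max of (count in tail + pending run for v)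
lemma scan_eq_runMax : ∀ (l : List (List Char)) (v : List Char) (r b : Int),
    l.Pairwise (· ≤ ·) → (∀ x ∈ l, v ≤ x) → 1 ≤ r → r ≤ b →
    (l.foldl pvStep (some v, r, b)).2.2 = pvRunMax l v r b := by
  intro l
  induction l with
  | nil => intro v r b _ _ _ _; rfl
  | cons x t ih =>
    intro v r b hp hlow hr hb
    have ht : t.Pairwise (· ≤ ·) := hp.of_cons
    have hxle : ∀ y ∈ t, x ≤ y := fun y hy => (List.pairwise_cons.mp hp).1 y hy
    by_cases hxv : x = v
    · subst hxv
      have hstep : pvStep (some x, r, b) x = (some x, r + 1, max b (r + 1)) := by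
        simp only [pvStep, Prod.mk.injEq]
        norm_num
        try split_ifs
        all_goals omega
      rw [List.foldl_cons, hstep, ih x (r + 1) (max b (r + 1)) ht hxle (by omega) (by omega)]
      -- now both sides are running maxes over t; align them
      have hcongr : pvRunMax (x :: t) x r b
          = t.foldl (fun acc y => max acc ((t.count y : Int) + if y = x then r + 1 else 0))
              (max b ((t.count x : Int) + 1 + r)) := by
        unfold pvRunMax
        rw [List.foldl_cons]
        have hhead : max b (((x :: t).count x : Int) + if x = x then r else 0)
            = max b ((t.count x : Int) + 1 + r) := by
          rw [if_pos rfl, List.count_cons_self]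
          push_cast
          omega
        rw [hhead]
        apply PySem.List.foldl_congr_mem
        intro acc y hy
        by_cases hyx : y = x
        · subst hyx
          rw [if_pos rfl, if_pos rfl, List.count_cons_self]
          push_cast
          omega
        · rw [if_neg hyx, if_neg hyx, List.count_cons_of_ne (fun h => hyx h.symm)]
      rw [hcongr]
      unfold pvRunMax
      rw [foldl_max_init t (fun y => (t.count y : Int) + if y = x then r + 1 else 0) b
            ((t.count x : Int) + 1 + r),
          foldl_max_init t (fun y => (t.count y : Int) + if y = x then r + 1 else 0) b (r + 1)]
      by_cases hxt : x ∈ t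
      · have hfle := (PySem.List.le_foldl_max_int t
            (fun y => (t.count y : Int) + if y = x then r + 1 else 0) b).2 x hxt
        simp only [if_pos] at hfle
        have hc : (1 : Int) ≤ (t.count x : Int) := by
          exact_mod_cast List.count_pos_iff.mpr hxt
        omega
      · have hc : t.count x = 0 := List.count_eq_zero.mpr hxt
        rw [hc]
        push_cast
        omega
    · have hstep : pvStep (some v, r, b) x = (some x, 1, b) := by
        have hne : ¬ (some x = (some v : Option (List Char))) := by
          simpa using hxv
        simp only [pvStep, Prod.mk.injEq, if_neg hne]
        norm_num
        try split_ifs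
        all_goals omega
      rw [List.foldl_cons, hstep, ih x 1 b ht hxle (by omega) (by omega)]
      -- every element of t dominates x > v, so the v-indicator dies and counts align
      have hvx : v < x := lt_of_le_of_ne (hlow x (by simp)) (fun h => hxv h.symm)
      have hyne : ∀ y ∈ t, y ≠ v := by
        intro y hy h
        subst h
        exact absurd (le_antisymm (hxle _ hy) (le_of_lt hvx) : x = y) hxv
      have hcongr : pvRunMax (x :: t) v r b
          = t.foldl (fun acc y => max acc ((t.count y : Int) + if y = x then 1 else 0))
              (max b ((t.count x : Int) + 1)) := by
        unfold pvRunMax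
        rw [List.foldl_cons]
        have hhead : max b (((x :: t).count x : Int) + if x = v then r else 0)
            = max b ((t.count x : Int) + 1) := by
          rw [if_neg hxv, List.count_cons_self]
          push_cast
          omega
        rw [hhead]
        apply PySem.List.foldl_congr_mem
        intro acc y hy
        rw [if_neg (hyne y hy)]
        by_cases hyx : y = x
        · subst hyx
          rw [if_pos rfl, List.count_cons_self]
          push_cast
          omega
        · rw [if_neg hyx, List.count_cons_of_ne (fun h => hyx h.symm)]
      rw [hcongr]
      unfold pvRunMax
      rw [foldl_max_init t (fun y => (t.count y : Int) + if y = x then 1 else 0) b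
            ((t.count x : Int) + 1)]
      by_cases hxt : x ∈ t
      · have hfle := (PySem.List.le_foldl_max_int t
            (fun y => (t.count y : Int) + if y = x then 1 else 0) b).2 x hxt
        simp only [if_pos] at hfle
        omega
      · have hc : t.count x = 0 := List.count_eq_zero.mpr hxt
        have hb' := (PySem.List.le_foldl_max_int t
            (fun y => (t.count y : Int) + if y = x then 1 else 0) b).1
        rw [hc]
        push_cast
        omega

theorem getMaxOccurrences_spec : Claim_equal_getMaxOccurrences := by
  intro s minLength maxLength maxUnique _
  unfold Spec_getMaxOccurrences getMaxOccurrences getMaxOccurrences_alt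
  simp only [dict_eq_counter]
  set cs := s.toList with hcs
  set L := ((PySem.List.pyRange 0 (PySem.List.len cs - minLength + 1) 1).map
      (fun i => PySem.List.slice cs (some i) (some (i + minLength)))).filter
    (fun sub => decide (PySem.List.len (PySem.Set.ofList sub) ≤ maxUnique)) with hL
  -- A's occurrences list = counts over the distinct elements of L
  have hocc : (PySem.Dict.counter L).keys.foldl
      (fun (acc : List Int) k => acc ++ [(PySem.Dict.counter L).getD k 0]) []
      = (PySem.Set.ofList L).map (fun k => (L.count k : Int)) := by
    rw [PySem.List.foldl_append_singleton_eq_map, List.nil_append, PySem.Dict.keys_counter]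
    exact List.map_congr_left (fun k _ => PySem.Dict.getD_counter L k)
  rw [hocc]
  rcases eq_or_ne L [] with h | h
  · rw [h]
    rfl
  -- both sides against the sorted list S
  · have hS : (PySem.List.sorted L (fun x => x) false).Perm L :=
      PySem.List.sorted_perm L (fun x => x) false
    have hScount : ∀ y, (PySem.List.sorted L (fun x => x) false).count y = L.count y :=
      fun y => hS.count_eq y
    have hSp : (PySem.List.sorted L (fun x => x) false).Pairwise (· ≤ ·) := by
      have h := PySem.List.sorted_pairwise (κ := List Char) L (fun x => x)
      rw [show (LinearOrder.toDecidableLT : DecidableLT (List Char))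
            = (fun a b : List Char => a.decidableLT b) from
          funext fun a => funext fun b => Subsingleton.elim _ _] at h
      exact h
    obtain ⟨x, hxL⟩ := List.exists_mem_of_ne_nil L h
    have hxS : x ∈ PySem.Set.ofList L := (PySem.Set.mem_ofList L x).mpr hxL
    have hoccne : (PySem.Set.ofList L).map (fun k => (L.count k : Int)) ≠ [] := by
      intro hnil
      rw [List.map_eq_nil_iff] at hnil
      simp [hnil] at hxS
    have hlen : PySem.List.len ((PySem.Set.ofList L).map (fun k => (L.count k : Int))) > 0 := by
      simp only [PySem.List.len]
      have := List.length_pos_iff.mpr hoccne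
      omega
    rw [if_pos hlen]
    cases hmax : PySem.List.max? ((PySem.Set.ofList L).map (fun k => (L.count k : Int))) (fun x => x) with
    | none =>
      rw [PySem.List.max?_eq_none_iff] at hmax
      exact absurd hmax hoccne
    | some m =>
      simp only [Option.getD_some]
      -- characterize m
      have hm_mem := PySem.List.max?_mem hmax
      obtain ⟨k, hkS, hkm⟩ := List.mem_map.mp hm_mem
      have hkL : k ∈ L := (PySem.Set.mem_ofList L k).mp hkS
      have hm_ub : ∀ y ∈ L, (L.count y : Int) ≤ m := by
        intro y hyL
        have hyS : y ∈ PySem.Set.ofList L := (PySem.Set.mem_ofList L y).mpr hyL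
        exact PySem.List.max?_isMax hmax _ (List.mem_map.mpr ⟨y, hyS, rfl⟩)
      -- unroll B's first loop iteration on the sorted list
      cases hSnil : PySem.List.sorted L (fun x => x) false with
      | nil =>
        rw [PySem.List.sorted_eq_nil_iff] at hSnil
        exact absurd hSnil h
      | cons a t =>
        show m = (t.foldl pvStep (some a, 1, 1)).2.2
        have hSp' := hSnil ▸ hSp
        have ht : t.Pairwise (· ≤ ·) := hSp'.of_cons
        have hale : ∀ y ∈ t, a ≤ y := fun y hy => (List.pairwise_cons.mp hSp').1 y hy
        rw [scan_eq_runMax t a 1 1 ht hale (by omega) (by omega)]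
        -- pvRunMax t a 1 1 = m
        unfold pvRunMax
        have hfcount : ∀ y ∈ t,
            (t.count y : Int) + (if y = a then 1 else 0) = (L.count y : Int) := by
          intro y hy
          rw [← hScount y, hSnil]
          by_cases hya : y = a
          · subst hya
            rw [List.count_cons_self, if_pos rfl]
            push_cast
            omega
          · rw [List.count_cons_of_ne (fun hh => hya hh.symm), if_neg hya]
            push_cast
            omega
        have hmemL : ∀ y ∈ t, y ∈ L := by
          intro y hy
          have : y ∈ PySem.List.sorted L (fun x => x) false := by

            rw [hSnil]; exact List.mem_cons_of_mem a hy
          exact hS.mem_iff.mp this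
        have hm1 : (1 : Int) ≤ m := by
          have := hm_ub k hkL
          have hc : (1 : Int) ≤ (L.count k : Int) := by
            exact_mod_cast List.count_pos_iff.mpr hkL
          omega
        have hub : t.foldl (fun acc y => max acc ((t.count y : Int) + if y = a then 1 else 0)) 1 ≤ m := by
          apply foldl_max_le t (fun y => (t.count y : Int) + if y = a then 1 else 0) 1 m hm1
          intro y hy
          rw [hfcount y hy]
          exact hm_ub y (hmemL y hy)
        have hlb : m ≤ t.foldl (fun acc y => max acc ((t.count y : Int) + if y = a then 1 else 0)) 1 := by
          have hkS' : k ∈ a :: t := by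
            rw [← hSnil]
            exact hS.mem_iff.mpr hkL
          rcases List.mem_cons.mp hkS' with hka | hkt
          · by_cases hkt2 : k ∈ t
            · have := (PySem.List.le_foldl_max_int t
                  (fun y => (t.count y : Int) + if y = a then 1 else 0) 1).2 k hkt2
              rw [hfcount k hkt2, hkm] at this
              exact this
            · -- k = a occurs exactly once, so m = 1
              have hcount : L.count k = 1 := by
                rw [← hScount k, hSnil, hka, List.count_cons_self,
                    List.count_eq_zero.mpr (hka ▸ hkt2)]
              have hm_eq : m = 1 := by
                rw [← hkm, hcount]
                norm_num
              rw [hm_eq]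
              exact (PySem.List.le_foldl_max_int t
                (fun y => (t.count y : Int) + if y = a then 1 else 0) 1).1
          · have := (PySem.List.le_foldl_max_int t
                (fun y => (t.count y : Int) + if y = a then 1 else 0) 1).2 k hkt
            rw [hfcount k hkt, hkm] at this
            exact this
        omega

-- ===== VERDICT (by name: the statement is the Claim_ definition above) =====
-- (proved above as getMaxOccurrences_spec)
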